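-- pv_equiv track=rewrite | github.com/sarasaleem1997/Prototyping_With_Data_Sara_Saleem | process_corpus.py | classify_line
-- ===== SOURCE A (Python) =====
-- from collections import Counter, defaultdict
--
-- def classify_line(tokens: list, seeds: dict) -> str | None:
--     """Return the best matching scenario for a line, or None if no match."""
--     scores = defaultdict(int)
--     for token in tokens:
--         for scenario, seed_words in seeds.items():
--             if token in seed_words:
--                 scores[scenario] += 1
--     if not scores:
--         return None
--     return max(scores, key=scores.get)
-- ===== SOURCE B (Python) =====
-- from collections import defaultdict
--
-- def classify_line(tokens: list, seeds: dict):
--     """Inverted index word->scenarios built once; single pass over tokens.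
--
--     Same result as the token x scenario double scan: the scores dict is
--     filled in the same insertion order, so max tie-breaking is identical."""
--     index = {}
--     for scenario, seed_words in seeds.items():
--         for w in seed_words:
--             lst = index.get(w, [])
--             if scenario not in lst:
--                 index[w] = lst + [scenario]
--     scores = defaultdict(int)
--     for token in tokens:
--         for scenario in index.get(token, []):
--             scores[scenario] += 1
--     if not scores:
--         return None
--     return max(scores, key=scores.get)
-- ===== Notes on version B (the rewrite author's own statement) =====
-- stated objective: faster
-- what changed: B inverts the seeds into a word-to-scenarios index built once, then scores with a single pass over the tokens (list lookups per token replaced by one dict lookup), instead of scanning every scenario's seed list for every token.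
import Mathlib
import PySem

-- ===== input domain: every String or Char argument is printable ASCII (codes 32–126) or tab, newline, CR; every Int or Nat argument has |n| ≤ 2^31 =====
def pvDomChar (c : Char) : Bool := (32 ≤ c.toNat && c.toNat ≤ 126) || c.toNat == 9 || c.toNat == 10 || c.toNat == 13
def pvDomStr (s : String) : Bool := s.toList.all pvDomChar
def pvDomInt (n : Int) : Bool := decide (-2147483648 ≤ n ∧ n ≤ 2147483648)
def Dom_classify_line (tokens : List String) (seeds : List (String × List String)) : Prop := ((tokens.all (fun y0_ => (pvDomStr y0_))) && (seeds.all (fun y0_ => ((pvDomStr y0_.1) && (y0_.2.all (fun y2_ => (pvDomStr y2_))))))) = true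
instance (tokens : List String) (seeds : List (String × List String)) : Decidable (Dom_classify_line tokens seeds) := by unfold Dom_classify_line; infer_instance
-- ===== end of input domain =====

-- B replaces A's per-token scan of every seed list by a word->scenarios index built once; proved equal on seed dicts with distinct scenario keys.


-- ===== PORT A =====
-- scores = defaultdict(int); for token in tokens: for scenario, seed_words in seeds.items(): if token in seed_words: scores[scenario] += 1
def pyScoresA (tokens : List String) (seeds : List (String × List String)) : PySem.Dict String Int :=
  tokens.foldl (fun sc token =>
    seeds.foldl (fun sc p =>
      if p.2.contains token then sc.modify p.1 0 (· + 1) else sc) sc)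
    PySem.Dict.empty

def classify_line (tokens : List String) (seeds : List (String × List String)) : Option String :=
  let scores := pyScoresA tokens seeds
  if scores.items.isEmpty then none
  else PySem.List.max? scores.keys (fun k => scores.getD k 0)

-- ===== PORT B =====
-- index = {}; for scenario, seed_words in seeds.items(): for w in seed_words: lst = index.get(w, []); if scenario not in lst: index[w] = lst + [scenario]
def pyIndexB (seeds : List (String × List String)) : PySem.Dict String (List String) :=
  seeds.foldl (fun idx p =>
    p.2.foldl (fun idx w =>
      let lst := idx.getD w []
      if lst.contains p.1 then idx else idx.insert w (lst ++ [p.1])) idx)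
    PySem.Dict.empty

-- scores = defaultdict(int); for token in tokens: for scenario in index.get(token, []): scores[scenario] += 1
def pyScoresB (tokens : List String) (seeds : List (String × List String)) : PySem.Dict String Int :=
  let index := pyIndexB seeds
  tokens.foldl (fun sc token =>
    (index.getD token []).foldl (fun sc scenario => sc.modify scenario 0 (· + 1)) sc)
    PySem.Dict.empty

def classify_line_alt (tokens : List String) (seeds : List (String × List String)) : Option String :=
  let scores := pyScoresB tokens seeds
  if scores.items.isEmpty then none
  else PySem.List.max? scores.keys (fun k => scores.getD k 0)

-- ===== PRECONDITION & SPEC =====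
-- Pre_ excludes assoc lists with duplicate scenario keys: a Python dict cannot contain them
-- (they collapse at construction), so such lists do not faithfully represent any input A receives.
def Pre_classify_line (tokens : List String) (seeds : List (String × List String)) : Prop :=
  (seeds.map Prod.fst).Nodup
instance (tokens : List String) (seeds : List (String × List String)) : Decidable (Pre_classify_line tokens seeds) := by unfold Pre_classify_line; infer_instance

def pvWitness_classify_line : List String × (List (String × List String)) :=
  (["cat", "run"], [("animals", ["cat", "dog"]), ("motion", ["run", "jump"])])

def Spec_classify_line (tokens : List String) (seeds : List (String × List String)) (out : Option String) : Prop := out = classify_line_alt tokens seeds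
instance (tokens : List String) (seeds : List (String × List String)) (out : Option String) : Decidable (Spec_classify_line tokens seeds out) := by unfold Spec_classify_line; infer_instance

-- ===== CLAIM (what is proved, stated in full; the proofs are below) =====
def Claim_equal_classify_line : Prop := ∀ (tokens : List String) (seeds : List (String × List String)), Dom_classify_line tokens seeds → Pre_classify_line tokens seeds → Spec_classify_line tokens seeds (classify_line tokens seeds)

-- ===== LEMMAS AND PROOFS =====

-- One scenario's inner loop: getD of the index after inserting scenario s for the words ws.
theorem pyIndex_inner_getD (s : String) (ws : List String)
    (idx : PySem.Dict String (List String)) (w : String) :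
    (ws.foldl (fun idx w =>
      let lst := idx.getD w []
      if lst.contains s then idx else idx.insert w (lst ++ [s])) idx).getD w []
    = if s ∈ idx.getD w [] then idx.getD w []
      else idx.getD w [] ++ (if w ∈ ws then [s] else []) := by
  induction ws generalizing idx with
  | nil => simp
  | cons w0 tl ih =>
    simp only [List.foldl_cons]
    by_cases h0 : s ∈ idx.getD w0 []
    · rw [show ((idx.getD w0 []).contains s) = true by simpa using h0]
      simp only [if_pos, ih idx]
      by_cases hw : w = w0
      · subst hw; simp [h0]
      · simp [List.mem_cons, hw]
    · rw [show ((idx.getD w0 []).contains s) = false by simpa using h0]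
      simp only [Bool.false_eq_true, if_false, ih]
      by_cases hw : w = w0
      · subst hw
        rw [PySem.Dict.getD_insert]
        simp [h0]
      · rw [PySem.Dict.getD_insert]
        simp [hw, List.mem_cons]

-- The whole index: index.get(w, []) lists, in seeds order, the scenarios whose seed list contains w.
theorem pyIndex_getD_aux (seeds : List (String × List String))
    (idx : PySem.Dict String (List String))
    (hnd : (seeds.map Prod.fst).Nodup)
    (hfresh : ∀ p ∈ seeds, ∀ v, p.1 ∉ idx.getD v []) (w : String) :
    (seeds.foldl (fun idx p =>
      p.2.foldl (fun idx w =>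
        let lst := idx.getD w []
        if lst.contains p.1 then idx else idx.insert w (lst ++ [p.1])) idx) idx).getD w []
    = idx.getD w [] ++ (seeds.filter (fun p => p.2.contains w)).map Prod.fst := by
  induction seeds generalizing idx with
  | nil => simp
  | cons p0 tl ih =>
    simp only [List.foldl_cons]
    have hnd' : (tl.map Prod.fst).Nodup := by simpa using hnd.of_cons
    have hnd2 : (p0.1 :: tl.map Prod.fst).Nodup := by simpa using hnd
    have h0 : p0.1 ∉ tl.map Prod.fst := (List.nodup_cons.mp hnd2).1
    have hfresh' : ∀ p ∈ tl, ∀ v,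
        p.1 ∉ (p0.2.foldl (fun idx w =>
          let lst := idx.getD w []
          if lst.contains p0.1 then idx else idx.insert w (lst ++ [p0.1])) idx).getD v [] := by
      intro p hp v
      rw [pyIndex_inner_getD]
      have hne : p.1 ≠ p0.1 := by
        intro h; exact h0 (by simpa [← h] using List.mem_map_of_mem (f := Prod.fst) hp)
      have hni : p.1 ∉ idx.getD v [] := hfresh p (List.mem_cons_of_mem _ hp) v
      split_ifs <;> simp [hni, hne]
    rw [ih _ hnd' hfresh', pyIndex_inner_getD]
    have hni : p0.1 ∉ idx.getD w [] := hfresh p0 (List.mem_cons_self) w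
    rw [if_neg hni]
    by_cases hw : w ∈ p0.2
    · simp [hw]
    · simp [hw]

theorem pyIndex_getD (seeds : List (String × List String))
    (hnd : (seeds.map Prod.fst).Nodup) (w : String) :
    (pyIndexB seeds).getD w []
      = (seeds.filter (fun p => p.2.contains w)).map Prod.fst := by
  unfold pyIndexB
  rw [pyIndex_getD_aux seeds PySem.Dict.empty hnd (by intro p _ v; simp [PySem.Dict.getD_empty]) w]
  simp [PySem.Dict.getD_empty]

-- A's inner scan over all scenarios equals B's walk of the index entry for the token.
theorem scores_step_eq (seeds : List (String × List String))
    (hnd : (seeds.map Prod.fst).Nodup)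
    (sc : PySem.Dict String Int) (token : String) :
    seeds.foldl (fun sc p =>
      if p.2.contains token then sc.modify p.1 0 (· + 1) else sc) sc
    = ((pyIndexB seeds).getD token []).foldl
        (fun sc scenario => sc.modify scenario 0 (· + 1)) sc := by
  rw [pyIndex_getD seeds hnd token, List.foldl_map,
      PySem.List.foldl_if_eq_foldl_filter (p := fun p : String × List String => p.2.contains token)
        (f := fun sc p => PySem.Dict.modify sc p.1 0 (· + 1))]

theorem scores_eq (tokens : List String) (seeds : List (String × List String))
    (hnd : (seeds.map Prod.fst).Nodup) :
    pyScoresA tokens seeds = pyScoresB tokens seeds := by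
  unfold pyScoresA pyScoresB
  exact PySem.List.foldl_congr_mem _ _ _ _ (fun sc token _ => scores_step_eq seeds hnd sc token)

-- ===== VERDICT (by name: the statement is the Claim_ definition above) =====
theorem classify_line_spec : Claim_equal_classify_line := by
  intro tokens seeds _ hpre
  unfold Spec_classify_line classify_line classify_line_alt
  rw [scores_eq tokens seeds hpre]
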